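-- pv_equiv track=rewrite | github.com/ragibasif/dsa | bctci/two_pointers.py | reverse_case_match
-- ===== SOURCE A (Python) =====
-- def reverse_case_match(s):
--     # assume len is even
--     def get_val(c):
--         if c.islower():
--             return ord(c) - ord('a')
--         else:
--             return ord(c) - ord('A')
--     low = 0
--     upp = len(s) - 1
--     while low < len(s) and upp >= 0:
--         if not s[low].islower():
--             low+=1
--         elif not s[upp].isupper():
--             upp -= 1
--         else:
--             if not (get_val(s[low]) == get_val(s[upp])):
--                 return False
--             low+=1
--             upp-=1
--     return True
-- ===== SOURCE B (Python) =====
-- def reverse_case_match(s):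
--     lowers = [ord(c) - ord('a') for c in s if c.islower()]
--     uppers = [ord(c) - ord('A') for c in reversed(s) if c.isupper()]
--     for x, y in zip(lowers, uppers):
--         if x != y:
--             return False
--     return True
-- ===== Notes on version B (the rewrite author's own statement) =====
-- stated objective: simpler
-- what changed: Replaces the interleaved two-pointer skip/compare loop by two independent filter passes (lowercase values left-to-right, uppercase values right-to-left) and a single zipped comparison that truncates at the shorter list; the C-level comprehensions/zip give a constant-factor speedup.
import Mathlib
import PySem

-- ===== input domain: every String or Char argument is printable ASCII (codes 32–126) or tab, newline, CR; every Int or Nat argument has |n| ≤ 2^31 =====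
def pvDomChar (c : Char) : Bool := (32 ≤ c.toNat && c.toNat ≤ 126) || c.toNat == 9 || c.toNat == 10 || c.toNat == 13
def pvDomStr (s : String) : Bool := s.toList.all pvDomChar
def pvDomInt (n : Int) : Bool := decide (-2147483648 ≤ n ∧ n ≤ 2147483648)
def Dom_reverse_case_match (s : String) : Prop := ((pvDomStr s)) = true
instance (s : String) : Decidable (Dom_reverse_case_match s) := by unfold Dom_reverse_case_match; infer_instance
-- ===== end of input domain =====

-- B replaces A's interleaved two-pointer skip/compare loop by two filter passes and one zipped comparison (objective: simpler).

-- ===== PORT A =====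
-- get_val(c)
def pvGetVal (c : Char) : Int :=
  if PySem.Chars.islower c then (c.toNat : Int) - ('a'.toNat : Int) else (c.toNat : Int) - ('A'.toNat : Int)
-- the while loop; s[low] / s[upp] via pyGetD (the guard keeps both indices in range on every
-- call reachable from reverse_case_match, so the default ' ' is never produced there)
def pvLoopA (cs : List Char) (low upp : Int) : Bool :=
  if h : low < (cs.length : Int) ∧ 0 ≤ upp then
    if ¬ PySem.Chars.islower (PySem.List.pyGetD cs low ' ') then
      pvLoopA cs (low + 1) upp
    else if ¬ PySem.Chars.isupper (PySem.List.pyGetD cs upp ' ') then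
      pvLoopA cs low (upp - 1)
    else if ¬ (pvGetVal (PySem.List.pyGetD cs low ' ') = pvGetVal (PySem.List.pyGetD cs upp ' ')) then
      false
    else
      pvLoopA cs (low + 1) (upp - 1)
  else
    true
termination_by ((cs.length : Int) - low + (upp + 1)).toNat
decreasing_by all_goals omega
def reverse_case_match (s : String) : Bool :=
  pvLoopA s.toList 0 ((s.toList.length : Int) - 1)

-- ===== PORT B =====
-- the 'for x, y in zip(lowers, uppers)' loop with its early 'return False'
def pvZipAll : List (Int × Int) → Bool
  | [] => true
  | (x, y) :: r => if x ≠ y then false else pvZipAll r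


def reverse_case_match_alt (s : String) : Bool :=
  let lowers := (s.toList.filter PySem.Chars.islower).map (fun c => (c.toNat : Int) - 97)
  let uppers := (s.toList.reverse.filter PySem.Chars.isupper).map (fun c => (c.toNat : Int) - 65)
  pvZipAll (lowers.zip uppers)

-- ===== PRECONDITION & SPEC =====
def Spec_reverse_case_match (s : String) (out : Bool) : Prop := out = reverse_case_match_alt s
instance (s : String) (out : Bool) : Decidable (Spec_reverse_case_match s out) := by unfold Spec_reverse_case_match; infer_instance

-- ===== CLAIM (what is proved, stated in full; the proofs are below) =====
def Claim_equal_reverse_case_match : Prop := ∀ (s : String), Dom_reverse_case_match s → Spec_reverse_case_match s (reverse_case_match s)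

-- ===== LEMMAS AND PROOFS =====

lemma pv_not_islower_of_isupper (c : Char) (h : PySem.Chars.isupper c = true) :
    PySem.Chars.islower c = false := by
  simp only [PySem.Chars.isupper, PySem.Chars.islower, Bool.and_eq_true, decide_eq_true_eq,
    Char.le_def, Bool.and_eq_false_iff, decide_eq_false_iff_not] at *
  obtain ⟨h1, h2⟩ := h
  left; intro hle
  have a1 := UInt32.le_iff_toNat_le.mp h2
  have a2 := UInt32.le_iff_toNat_le.mp hle
  simp [Char.reduceVal] at a1 a2
  omega


lemma pvLoopA_eq (cs : List Char) (low upp : Int) (hlow : 0 ≤ low) (hupp : upp < (cs.length : Int)) :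
    pvLoopA cs low upp =
      pvZipAll ((((cs.drop low.toNat).filter PySem.Chars.islower).map
                   (fun c => (c.toNat : Int) - 97)).zip
                ((((cs.take (upp + 1).toNat).filter PySem.Chars.isupper).map
                   (fun c => (c.toNat : Int) - 65)).reverse)) := by
  rw [pvLoopA]
  by_cases h : low < (cs.length : Int) ∧ 0 ≤ upp
  · rw [dif_pos h]
    have hn : low.toNat < cs.length := by omega
    have hm : upp.toNat < cs.length := by omega
    have hgl := PySem.List.pyGetD_eq_getElem cs (i := low) ' ' (by omega) (by omega)
    have hgu := PySem.List.pyGetD_eq_getElem cs (i := upp) ' ' (by omega) (by omega)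
    have hdrop : cs.drop low.toNat = cs[low.toNat] :: cs.drop (low.toNat + 1) :=
      List.drop_eq_getElem_cons hn
    have htake : cs.take (upp + 1).toNat = cs.take upp.toNat ++ [cs[upp.toNat]] := by
      have h1 : (upp + 1).toNat = upp.toNat + 1 := by omega
      rw [h1, List.take_add_one]
      simp [List.getElem?_eq_getElem hm]
    rw [hgl, hgu]
    by_cases hl : PySem.Chars.islower cs[low.toNat] = true
    · rw [if_neg (by simp [hl])]
      by_cases hu : PySem.Chars.isupper cs[upp.toNat] = true
      · rw [if_neg (by simp [hu])]
        have hvl : pvGetVal cs[low.toNat] = (cs[low.toNat].toNat : Int) - 97 := by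
          simp [pvGetVal, hl]
        have hvu : pvGetVal cs[upp.toNat] = (cs[upp.toNat].toNat : Int) - 65 := by
          simp [pvGetVal, pv_not_islower_of_isupper _ hu]
        by_cases heq : pvGetVal cs[low.toNat] = pvGetVal cs[upp.toNat]
        · rw [if_neg (not_not_intro heq)]
          rw [pvLoopA_eq cs (low + 1) (upp - 1) (by omega) (by omega)]
          have e1 : (low + 1).toNat = low.toNat + 1 := by omega
          have e2 : (upp - 1 + 1).toNat = upp.toNat := by omega
          rw [e1, e2, hdrop, htake]
          have hxy : (cs[low.toNat].toNat : Int) - 97 = (cs[upp.toNat].toNat : Int) - 65 := by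
            rw [hvl, hvu] at heq; exact heq
          simp only [List.filter_cons, List.filter_append, hl, hu, if_true, List.filter_nil,
            List.map_cons, List.map_append, List.map_nil, List.reverse_append, List.reverse_cons,
            List.reverse_nil, List.nil_append, List.cons_append, List.zip_cons_cons, pvZipAll]
          simp [hxy]
        · rw [if_pos heq]
          have hxy : ¬ ((cs[low.toNat].toNat : Int) - 97 = (cs[upp.toNat].toNat : Int) - 65) := by
            rw [hvl, hvu] at heq; exact heq
          rw [hdrop, htake]
          simp only [List.filter_cons, List.filter_append, hl, hu, if_true, List.filter_nil,
            List.map_cons, List.map_append, List.map_nil, List.reverse_append, List.reverse_cons,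
            List.reverse_nil, List.nil_append, List.cons_append, List.zip_cons_cons, pvZipAll]
          simp [hxy]
      · rw [if_pos hu]
        rw [pvLoopA_eq cs low (upp - 1) hlow (by omega)]
        have e2 : (upp - 1 + 1).toNat = upp.toNat := by omega
        have hu' : PySem.Chars.isupper cs[upp.toNat] = false := by simpa using hu
        rw [e2, htake]
        simp only [List.filter_append, List.filter_cons, hu', Bool.false_eq_true, if_false,
          List.filter_nil, List.append_nil]
    · rw [if_pos hl]
      rw [pvLoopA_eq cs (low + 1) upp (by omega) hupp]
      have e1 : (low + 1).toNat = low.toNat + 1 := by omega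
      have hl' : PySem.Chars.islower cs[low.toNat] = false := by simpa using hl
      rw [e1, hdrop]
      simp only [List.filter_cons, hl', Bool.false_eq_true, if_false]
  · rw [dif_neg h]
    rcases (by omega : (cs.length : Int) ≤ low ∨ upp < 0) with hc | hc
    · have hc' : cs.length ≤ low.toNat := by omega
      simp [List.drop_eq_nil_of_le hc', pvZipAll]
    · have h0 : (upp + 1).toNat = 0 := by omega
      simp [h0, pvZipAll]
termination_by ((cs.length : Int) - low + (upp + 1)).toNat
decreasing_by all_goals omega

-- ===== VERDICT (by name: the statement is the Claim_ definition above) =====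
theorem reverse_case_match_spec : Claim_equal_reverse_case_match := by
  intro s _
  unfold Spec_reverse_case_match reverse_case_match reverse_case_match_alt
  have h := pvLoopA_eq s.toList 0 ((s.toList.length : Int) - 1) (by omega) (by omega)
  have e : (((s.toList.length : Int) - 1) + 1).toNat = s.toList.length := by omega
  rw [e, List.take_length] at h
  simpa using h
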